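-- pv_equiv track=rewrite | github.com/leonidsanov/basics_python | lesson_1/task_2.py | sum_of_even_numbers
-- ===== SOURCE A (Python) =====
-- def sum_of_even_numbers(n, e):
--     i = 1
--     total_sum = 0
--
--     while i <= n:
--         if i % 2 == 0 and i % e != 0:
--             total_sum += i
--         i += 1
--
--     return total_sum
-- ===== SOURCE B (Python) =====
-- def sum_of_even_numbers(n, e):
--     # Closed-form: sum of evens 2..n minus sum of multiples of lcm(2, |e|) up to n.
--     if n < 2:
--         return 0
--     m = n // 2
--     total = m * (m + 1)  # 2 + 4 + ... + 2m
--     L = abs(e) if e % 2 == 0 else 2 * abs(e)  # lcm(2, |e|)  (raises for e == 0, like A)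
--     k = n // L
--     return total - L * k * (k + 1) // 2
-- ===== Notes on version B (the rewrite author's own statement) =====
-- stated objective: faster
-- what changed: Replaced A's while-loop accumulation over 1..n by a closed-form arithmetic-series formula: sum of evens up to n minus the sum of multiples of lcm(2,|e|) up to n.
import Mathlib
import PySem

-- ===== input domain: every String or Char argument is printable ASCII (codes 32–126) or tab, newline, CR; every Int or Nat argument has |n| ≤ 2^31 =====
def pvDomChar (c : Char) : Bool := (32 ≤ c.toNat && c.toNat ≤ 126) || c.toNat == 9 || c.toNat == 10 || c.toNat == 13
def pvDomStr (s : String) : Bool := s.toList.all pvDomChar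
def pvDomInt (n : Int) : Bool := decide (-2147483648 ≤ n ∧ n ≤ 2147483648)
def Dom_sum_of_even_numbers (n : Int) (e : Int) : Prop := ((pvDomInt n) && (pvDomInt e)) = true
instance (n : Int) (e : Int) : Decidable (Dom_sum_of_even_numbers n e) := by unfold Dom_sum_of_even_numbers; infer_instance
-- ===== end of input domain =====

-- B replaces A's O(n) accumulation loop by O(1) closed-form arithmetic series
-- (sum of evens up to n minus sum of multiples of lcm(2,|e|) up to n).


-- ===== PORT A =====
-- the while loop: state (i, total_sum)
def pvLoopA (n : Int) (e : Int) (i : Int) (total : Int) : Int :=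
  if _h : i ≤ n then
    pvLoopA n e (i + 1)
      (if PySem.Int.mod i 2 = 0 ∧ PySem.Int.mod i e ≠ 0 then total + i else total)
  else total
termination_by (n + 1 - i).toNat
decreasing_by omega

def sum_of_even_numbers (n : Int) (e : Int) : Int := pvLoopA n e 1 0

-- ===== PORT B =====
def sum_of_even_numbers_alt (n : Int) (e : Int) : Int :=
  if n < 2 then 0
  else
    let m := PySem.Int.floordiv n 2
    let total := m * (m + 1)
    let L := if PySem.Int.mod e 2 = 0 then |e| else 2 * |e|
    let k := PySem.Int.floordiv n L
    total - PySem.Int.floordiv (L * k * (k + 1)) 2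

-- ===== PRECONDITION & SPEC =====
-- Pre_ excludes exactly the inputs where A raises ZeroDivisionError (e = 0 with some
-- even i reached, i.e. n ≥ 2); B raises there too.
def Pre_sum_of_even_numbers (n : Int) (e : Int) : Prop := e ≠ 0 ∨ n < 2
instance (n : Int) (e : Int) : Decidable (Pre_sum_of_even_numbers n e) := by
  unfold Pre_sum_of_even_numbers; infer_instance

def pvWitness_sum_of_even_numbers : Int × Int := (10, 3)

def Spec_sum_of_even_numbers (n : Int) (e : Int) (out : Int) : Prop := out = sum_of_even_numbers_alt n e
instance (n : Int) (e : Int) (out : Int) : Decidable (Spec_sum_of_even_numbers n e out) := by unfold Spec_sum_of_even_numbers; infer_instance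

-- ===== CLAIM (what is proved, stated in full; the proofs are below) =====
def Claim_equal_sum_of_even_numbers : Prop := ∀ (n : Int) (e : Int), Dom_sum_of_even_numbers n e → Pre_sum_of_even_numbers n e → Spec_sum_of_even_numbers n e (sum_of_even_numbers n e)

-- ===== LEMMAS AND PROOFS =====

-- the contribution of a single i to A's sum
def pvF (e : Int) (i : Int) : Int :=
  if PySem.Int.mod i 2 = 0 ∧ PySem.Int.mod i e ≠ 0 then i else 0

theorem pvLoopA_unfold (n e i total : Int) :
    pvLoopA n e i total =
      if i ≤ n then pvLoopA n e (i + 1) (total + pvF e i) else total := by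
  rw [pvLoopA]
  unfold pvF
  split_ifs <;> simp_all

theorem pvF_eq (e i : Int) : pvF e i = if 2 ∣ i ∧ ¬ e ∣ i then i else 0 := by
  unfold pvF
  by_cases h1 : 2 ∣ i <;> by_cases h2 : e ∣ i <;>
    simp [PySem.Int.mod_eq_zero_iff_dvd, h1, h2]

-- peeling the last iteration off the loop
theorem pvLoopA_last (e : Int) : ∀ (n i total : Int), i ≤ n →
    pvLoopA n e i total = pvLoopA (n - 1) e i total + pvF e n := by
  intro n i total h
  induction hk : (n - i).toNat generalizing i total with
  | zero =>
    have hin : i = n := by omega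
    subst hin
    rw [pvLoopA_unfold, if_pos le_rfl, pvLoopA_unfold, if_neg (by omega),
        pvLoopA_unfold, if_neg (by omega)]
  | succ k ih =>
    rw [pvLoopA_unfold, if_pos h, pvLoopA_unfold (n - 1), if_pos (by omega)]
    exact ih (i + 1) _ (by omega) (by omega)

theorem sum_A_rec (n e : Int) (h : 1 ≤ n) :
    sum_of_even_numbers n e = sum_of_even_numbers (n - 1) e + pvF e n := by
  unfold sum_of_even_numbers
  exact pvLoopA_last e n 1 0 h

theorem sum_A_low (n e : Int) (h : n < 2) : sum_of_even_numbers n e = 0 := by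
  unfold sum_of_even_numbers
  rcases lt_or_ge n 1 with h1 | h1
  · rw [pvLoopA_unfold, if_neg (by omega)]
  · have hn : n = 1 := by omega
    subst hn
    rw [pvLoopA_unfold, if_pos le_rfl, pvLoopA_unfold, if_neg (by omega)]
    simp [pvF, PySem.Int.mod]

-- the lcm used by B
def pvL (e : Int) : Int := if PySem.Int.mod e 2 = 0 then |e| else 2 * |e|

theorem pvL_pos (e : Int) (he : e ≠ 0) : 0 < pvL e := by
  unfold pvL; split_ifs <;> [exact abs_pos.mpr he; positivity]

theorem pvL_even (e : Int) (_he : e ≠ 0) : 2 ∣ pvL e := by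
  unfold pvL
  simp only [PySem.Int.mod_eq_zero_iff_dvd]
  split_ifs with h
  · exact (dvd_abs 2 e).mpr h
  · exact Dvd.intro _ rfl

theorem pvL_dvd_iff (e m : Int) (_he : e ≠ 0) : pvL e ∣ m ↔ (2 ∣ m ∧ e ∣ m) := by
  unfold pvL
  simp only [PySem.Int.mod_eq_zero_iff_dvd]
  split_ifs with h
  · rw [abs_dvd]
    constructor
    · intro hd; exact ⟨dvd_trans h hd, hd⟩
    · exact fun ⟨_, hd⟩ => hd
  · constructor
    · intro hd
      refine ⟨dvd_trans ⟨|e|, rfl⟩ hd, dvd_trans (Dvd.dvd.mul_left ((dvd_abs e e).mpr dvd_rfl) 2) hd⟩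
    · rintro ⟨h2, heD⟩
      have habs : |e| ∣ m := (abs_dvd e m).mpr heD
      obtain ⟨a, ha⟩ := habs
      have hodd : ¬ (2 ∣ |e|) := fun hc => h ((dvd_abs 2 e).mp hc)
      have h2a : 2 ∣ a := by
        rcases (Int.prime_two.dvd_mul).mp (ha ▸ h2) with hc | hc
        · exact absurd hc hodd
        · exact hc
      obtain ⟨b, hb⟩ := h2a
      exact ⟨b, by rw [ha, hb]; ring⟩

-- B's value without the n < 2 guard
def pvG (n e : Int) : Int :=
  PySem.Int.floordiv n 2 * (PySem.Int.floordiv n 2 + 1) -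
    PySem.Int.floordiv (pvL e * PySem.Int.floordiv n (pvL e) * (PySem.Int.floordiv n (pvL e) + 1)) 2

theorem alt_eq_pvG (n e : Int) (h : ¬ n < 2) : sum_of_even_numbers_alt n e = pvG n e := by
  unfold sum_of_even_numbers_alt pvG pvL
  rw [if_neg h]

theorem pvG_one (e : Int) (he : e ≠ 0) : pvG 1 e = 0 := by
  have hL := pvL_pos e he
  unfold pvG
  have h2 : PySem.Int.floordiv 1 2 = 0 := by decide
  have hk : PySem.Int.floordiv 1 (pvL e) = if pvL e = 1 then 1 else 0 := by
    rw [PySem.Int.floordiv_eq_ediv_of_pos hL]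
    split_ifs with h1
    · rw [h1]; decide
    · rw [Int.one_ediv]; omega
  rcases (pvL_even e he) with ⟨c, hc⟩
  have hne : pvL e ≠ 1 := by omega
  rw [h2, hk, if_neg hne]
  norm_num

-- difference of consecutive triangular-type terms:  pvG n - pvG (n-1) = pvF n
theorem pvG_rec (n e : Int) (he : e ≠ 0) :
    pvG n e = pvG (n - 1) e + pvF e n := by
  have hL := pvL_pos e he
  have hL2 := pvL_even e he
  set L := pvL e with hLdef
  rw [pvF_eq]
  unfold pvG
  -- name the four quotients
  set m := PySem.Int.floordiv n 2 with hm
  set m' := PySem.Int.floordiv (n - 1) 2 with hm'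
  set k := PySem.Int.floordiv n L with hk
  set k' := PySem.Int.floordiv (n - 1) L with hk'
  have hmE : m = n / 2 := by rw [hm, PySem.Int.floordiv_eq_ediv_of_pos (by norm_num)]
  have hm'E : m' = (n - 1) / 2 := by rw [hm', PySem.Int.floordiv_eq_ediv_of_pos (by norm_num)]
  have hkE : k = n / L := by rw [hk, PySem.Int.floordiv_eq_ediv_of_pos hL]
  have hk'E : k' = (n - 1) / L := by rw [hk', PySem.Int.floordiv_eq_ediv_of_pos hL]
  -- quotient steps
  have hmstep : (2 ∣ n → m = m' + 1) ∧ (¬ 2 ∣ n → m = m') := by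
    constructor <;> intro h <;> omega
  have hLne : L ≠ 0 := by omega
  have hkstep : (L ∣ n → k = k' + 1 ∧ L * k = n) ∧ (¬ L ∣ n → k = k') := by
    constructor
    · rintro ⟨c, hc⟩
      have hkc : k = c := by rw [hkE, hc, Int.mul_ediv_cancel_left c hLne]
      have hk'c : k' = c - 1 := by
        rw [hk'E, hc, show L * c - 1 = (L - 1) + (c - 1) * L from by ring,
            Int.add_mul_ediv_right _ _ hLne,
            Int.ediv_eq_zero_of_lt (by omega) (by omega)]
        omega
      exact ⟨by omega, by rw [hkc, hc]⟩
    · intro h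
      obtain ⟨r, hr0, hrL, hrne, hq⟩ :
          ∃ r : Int, 0 ≤ r ∧ r < L ∧ r ≠ 0 ∧ L * (n / L) + r = n :=
        ⟨n % L, Int.emod_nonneg n hLne, Int.emod_lt_of_pos n hL,
          fun hc => h (Int.dvd_of_emod_eq_zero hc), Int.mul_ediv_add_emod n L⟩
      rw [hkE, hk'E, show n - 1 = (r - 1) + (n / L) * L from by linear_combination -hq,
          Int.add_mul_ediv_right _ _ hLne,
          Int.ediv_eq_zero_of_lt (by omega : (0:Int) ≤ r - 1) (by omega : r - 1 < L)]
      exact (zero_add _).symm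
  -- the two subtracted terms are even
  have hTn : 2 ∣ L * k * (k + 1) := by
    obtain ⟨c, hc⟩ := (Int.even_mul_succ_self k).two_dvd
    exact ⟨L * c, by rw [mul_assoc, hc]; ring⟩
  have hTn' : 2 ∣ L * k' * (k' + 1) := by
    obtain ⟨c, hc⟩ := (Int.even_mul_succ_self k').two_dvd
    exact ⟨L * c, by rw [mul_assoc, hc]; ring⟩
  have hTnE : PySem.Int.floordiv (L * k * (k + 1)) 2 = L * k * (k + 1) / 2 :=
    PySem.Int.floordiv_eq_ediv_of_pos (by norm_num)
  have hTn'E : PySem.Int.floordiv (L * k' * (k' + 1)) 2 = L * k' * (k' + 1) / 2 :=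
    PySem.Int.floordiv_eq_ediv_of_pos (by norm_num)
  rw [hTnE, hTn'E]
  by_cases h2 : 2 ∣ n
  · have hmv := hmstep.1 h2
    have hprod : m * (m + 1) - m' * (m' + 1) = n := by
      have h2m : 2 * (m' + 1) = n := by omega
      rw [hmv]; linear_combination h2m
    by_cases hev : e ∣ n
    · -- n even and divisible by e: no contribution; subtracted term grows by n too
      have hLn : L ∣ n := (pvL_dvd_iff e n he).mpr ⟨h2, hev⟩
      obtain ⟨hkv, hLk⟩ := hkstep.1 hLn
      rw [if_neg (by simp [hev])]
      have hAB : L * k * (k + 1) - L * k' * (k' + 1) = 2 * n := by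
        rw [hkv, ← hLk, hkv]; ring
      set A := L * k * (k + 1) with hA
      set B := L * k' * (k' + 1) with hB
      set P := m * (m + 1) with hP
      set P' := m' * (m' + 1) with hP'
      omega
    · -- n even, not divisible by e: contributes n; L ∤ n
      have hLn : ¬ L ∣ n := fun hc => hev ((pvL_dvd_iff e n he).mp hc).2
      have hkv := hkstep.2 hLn
      rw [if_pos ⟨h2, hev⟩, hkv]
      set A := L * k' * (k' + 1) with hA
      set P := m * (m + 1) with hP
      set P' := m' * (m' + 1) with hP'
      omega
  · -- n odd: no contribution, neither quotient moves
    have hmv := hmstep.2 h2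
    have hLn : ¬ L ∣ n := fun hc => h2 ((pvL_dvd_iff e n he).mp hc).1
    have hkv := hkstep.2 hLn
    rw [if_neg (by simp [h2]), hmv, hkv]
    omega

theorem main_eq (e : Int) (he : e ≠ 0) : ∀ n : Int, 1 ≤ n →
    sum_of_even_numbers n e = pvG n e := by
  intro n hn
  induction n, hn using Int.le_induction with
  | base => rw [sum_A_low 1 e (by omega), pvG_one e he]
  | succ n _hn ih =>
    rw [sum_A_rec _ e (by omega), pvG_rec _ e he]
    simp only [add_sub_cancel_right]
    rw [ih]

-- ===== VERDICT (by name: the statement is the Claim_ definition above) =====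
theorem sum_of_even_numbers_spec : Claim_equal_sum_of_even_numbers := by
  intro n e _ hpre
  unfold Spec_sum_of_even_numbers
  by_cases h2 : n < 2
  · rw [sum_A_low n e h2]
    unfold sum_of_even_numbers_alt
    rw [if_pos h2]
  · have he : e ≠ 0 := by rcases hpre with h | h; exact h; omega
    rw [alt_eq_pvG n e h2, main_eq e he n (by omega)]
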